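-- pv_equiv track=rewrite | github.com/Mightyhaha/Advent-of-code-2025 | day3/aoc3.py | solve_batteries2
-- ===== SOURCE A (Python) =====
-- def solve_batteries2(input_str):
--     lines = input_str.strip().split('\n')
--     total_output = 0
--
--     for line in lines:
--         if not line:
--             continue
--
--         digits = [int(d) for d in line]
--         n = len(digits)
--
--         if n < 12:
--             joltage_str = ''.join(str(d) for d in digits)
--             joltage = int(joltage_str) if joltage_str else 0
--             total_output += joltage
--             continue
--
--         num_to_remove = n - 12
--         kept = []
--
--         for i in range(n):
--             while kept and kept[-1] < digits[i] and num_to_remove > 0: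
--                 kept.pop()
--                 num_to_remove -= 1
--
--             kept.append(digits[i])
--
--         while num_to_remove > 0:
--             kept.pop()
--             num_to_remove -= 1
--
--         joltage_str = ''.join(str(d) for d in kept[:12])
--         joltage = int(joltage_str)
--         total_output += joltage
--     return total_output
-- ===== SOURCE B (Python) =====
-- def _line_value(line):
--     digits = [int(c) for c in line]
--     n = len(digits)
--     if n < 12:
--         chosen = digits
--     else:
--         chosen = []
--         start = 0
--         for j in range(12):
--             hi = n - (12 - j)          # inclusive upper end of the window for slot j
--             best = start
--             for i in range(start + 1, hi + 1):
--                 if digits[i] > digits[best]: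
--                     best = i
--             chosen.append(digits[best])
--             start = best + 1
--     s = ''.join(str(d) for d in chosen)
--     return int(s) if s else 0
--
--
-- def solve_batteries2(input_str):
--     return sum(_line_value(line) for line in input_str.strip().split('\n'))
-- ===== Notes on version B (the rewrite author's own statement) =====
-- stated objective: alternative
-- what changed: Per line the 12 kept digits are chosen by greedy window selection (for each output slot scan digits[start..n-(12-j)] for the leftmost maximum) instead of a monotonic stack with a removal budget, and the total is a sum over a map instead of an accumulator loop with continue.
import Mathlib
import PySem

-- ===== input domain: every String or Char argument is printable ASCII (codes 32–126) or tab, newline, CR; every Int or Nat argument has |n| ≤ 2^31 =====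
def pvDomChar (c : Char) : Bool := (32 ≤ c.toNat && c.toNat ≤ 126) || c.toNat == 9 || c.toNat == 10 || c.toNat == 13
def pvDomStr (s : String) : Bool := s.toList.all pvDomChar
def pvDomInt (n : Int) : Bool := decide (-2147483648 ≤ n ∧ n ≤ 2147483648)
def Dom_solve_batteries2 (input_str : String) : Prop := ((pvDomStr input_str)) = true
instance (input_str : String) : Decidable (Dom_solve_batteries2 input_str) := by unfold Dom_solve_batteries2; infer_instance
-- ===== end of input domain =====

-- B replaces A's monotonic-stack digit selection by greedy window max-scans and the
-- accumulator loop by a sum over a map (objective: alternative, same exact results).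

-- ===== PORT A =====
-- int(d) for a one-character string d (ValueError = none is excluded by Pre_)
def pvIntChar (c : Char) : Int := (PySem.Int.ofChars? [c]).getD 0

-- 'while kept and kept[-1] < d and num_to_remove > 0: kept.pop(); num_to_remove -= 1'
-- (the Python stack's top/end is the HEAD of this list; append = cons)
def aPop (kept : List Int) (r : Int) (d : Int) : List Int × Int :=
  match kept with
  | [] => ([], r)
  | t :: s => if t < d ∧ 0 < r then aPop s (r - 1) d else (t :: s, r)

-- one iteration of 'for i in range(n)': the while loop, then kept.append(digits[i])
def aPush (st : List Int × Int) (d : Int) : List Int × Int :=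
  let p := aPop st.1 st.2 d
  (d :: p.1, p.2)

-- 'while num_to_remove > 0: kept.pop(); num_to_remove -= 1'
-- (tail [] = [] is unreachable: the budget never exceeds the stack height)
def aTrim (kept : List Int) (r : Int) : List Int :=
  if h : 0 < r then aTrim kept.tail (r - 1) else kept
  termination_by r.toNat
  decreasing_by simp_wf; omega

-- one nonempty line of the loop body (digits, the n < 12 branch, the stack branch)
def aLine (line : List Char) : Int :=
  let digits := line.map pvIntChar
  let n := digits.length
  if n < 12 then
    let cs := PySem.Chars.join [] (digits.map PySem.Int.toChars)
    if cs ≠ [] then (PySem.Int.ofChars? cs).getD 0 else 0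
  else
    let st := digits.foldl aPush ([], (n : Int) - 12)
    let kept := (aTrim st.1 st.2).reverse
    let cs := PySem.Chars.join [] ((PySem.List.slice kept none (some 12)).map PySem.Int.toChars)
    (PySem.Int.ofChars? cs).getD 0

def solve_batteries2 (input_str : String) : Int :=
  (PySem.Chars.splitOn (PySem.Chars.strip input_str.toList) ['\n']).foldl
    (fun acc line => if line = [] then acc else acc + aLine line) 0

-- ===== PORT B =====
-- the inner loop 'for i in range(start+1, hi+1): if digits[i] > digits[best]: best = i'
def bBest (digits : List Int) (j e : Int) (best : Int) : Int :=
  (PySem.List.pyRange j e 1).foldl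
    (fun best i =>
      if PySem.List.pyGetD digits i 0 > PySem.List.pyGetD digits best 0 then i else best)
    best

-- the outer loop 'for j in range(12): ... chosen.append(digits[best]); start = best + 1'
def bSelect (digits : List Int) (j : Int) (st : List Int × Int) : List Int × Int :=
  (PySem.List.pyRange j 12 1).foldl
    (fun st j =>
      let hi : Int := (digits.length : Int) - (12 - j)
      let best := bBest digits (st.2 + 1) (hi + 1) st.2
      (st.1 ++ [PySem.List.pyGetD digits best 0], best + 1))
    st

-- _line_value: greedy window selection of the 12 kept digits
def bLine (line : List Char) : Int :=
  let digits := line.map pvIntChar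
  let chosen := if digits.length < 12 then digits else (bSelect digits 0 ([], 0)).1
  let cs := PySem.Chars.join [] (chosen.map PySem.Int.toChars)
  if cs ≠ [] then (PySem.Int.ofChars? cs).getD 0 else 0

def solve_batteries2_alt (input_str : String) : Int :=
  ((PySem.Chars.splitOn (PySem.Chars.strip input_str.toList) ['\n']).map bLine).sum

-- ===== PRECONDITION & SPEC =====
-- A raises ValueError (int(d)) on any line containing a non-digit character;
-- Pre_ admits exactly the inputs whose stripped lines consist of digits only.
def Pre_solve_batteries2 (input_str : String) : Prop :=
  ((PySem.Chars.splitOn (PySem.Chars.strip input_str.toList) ['\n']).all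
    (fun line => line.all PySem.Chars.isdigit)) = true
instance (input_str : String) : Decidable (Pre_solve_batteries2 input_str) := by
  unfold Pre_solve_batteries2; infer_instance

def pvWitness_solve_batteries2 : String := "9876543210987\n12"

def Spec_solve_batteries2 (input_str : String) (out : Int) : Prop := out = solve_batteries2_alt input_str
instance (input_str : String) (out : Int) : Decidable (Spec_solve_batteries2 input_str out) := by
  unfold Spec_solve_batteries2; infer_instance

-- ===== CLAIM (what is proved, stated in full; the proofs are below) =====
def Claim_equal_solve_batteries2 : Prop := ∀ (input_str : String), Dom_solve_batteries2 input_str → Pre_solve_batteries2 input_str → Spec_solve_batteries2 input_str (solve_batteries2 input_str)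

-- ===== LEMMAS AND PROOFS =====

-- the maximum of a nonempty list, and the greedy (leftmost-max-of-window) selection of k elements
def wmax : List Int → Int
  | [] => 0
  | x :: t => t.foldl max x

def greedy : Nat → List Int → List Int
  | 0, _ => []
  | (k+1), xs =>
      let w := xs.take (xs.length - k)
      let p := w.idxOf (wmax w)
      xs.getD p 0 :: greedy k (xs.drop (p + 1))

-- characterisation of p := w.idxOf (wmax w) on a nonempty w
theorem wmax_mem (w : List Int) (h : w ≠ []) : wmax w ∈ w := by
  match w with
  | x :: t =>
    rcases PySem.List.foldl_max_mem t x with h1 | h1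
    · rw [wmax, h1]; exact List.mem_cons_self
    · exact List.mem_cons_of_mem _ h1

theorem wmax_is_max (w : List Int) (i : Nat) (hi : i < w.length) : w[i] ≤ wmax w := by
  match w with
  | x :: t =>
    match i with
    | 0 => exact (PySem.List.le_foldl_max t x).1
    | i + 1 =>
      simp only [List.getElem_cons_succ]
      exact (PySem.List.le_foldl_max t x).2 _ (List.getElem_mem _)

theorem idxOf_wmax_lt (w : List Int) (h : w ≠ []) : w.idxOf (wmax w) < w.length :=
  List.idxOf_lt_length_of_mem (wmax_mem w h)

theorem getElem_idxOf_wmax (w : List Int) (h : w ≠ []) :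
    w[w.idxOf (wmax w)]'(idxOf_wmax_lt w h) = wmax w :=
  List.getElem_idxOf (idxOf_wmax_lt w h)

theorem lt_of_lt_idxOf_wmax (w : List Int) (h : w ≠ []) (i : Nat) (hi : i < w.idxOf (wmax w)) :
    w[i]'(lt_trans hi (idxOf_wmax_lt w h)) < wmax w := by
  have hlen := idxOf_wmax_lt w h
  have hile : i < w.length := lt_trans hi hlen
  rcases lt_or_eq_of_le (wmax_is_max w i hile) with h1 | h1
  · exact h1
  · exfalso
    have hmem : wmax w ∈ w.take (i + 1) := by
      rw [← h1]
      have h2 : i < (w.take (i + 1)).length := by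
        rw [List.length_take]; omega
      have h3 := List.getElem_mem h2
      rwa [List.getElem_take] at h3
    have := (List.mem_take_iff_idxOf_lt (wmax_mem w h)).1 hmem
    omega

theorem leftmost_unique (w : List Int) (q : Nat) (hq : q < w.length)
    (hlt : ∀ i (h : i < q), w[i]'(lt_trans h hq) < w[q])
    (hle : ∀ i (h : i < w.length), w[i] ≤ w[q]) : q = w.idxOf (wmax w) := by
  have h : w ≠ [] := by intro h; subst h; simp at hq
  have hp := idxOf_wmax_lt w h
  have heq : w[q] = wmax w := by
    have h1 := wmax_is_max w q hq
    have h2 := hle _ hp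
    rw [getElem_idxOf_wmax w h] at h2
    omega
  rcases Nat.lt_trichotomy q (w.idxOf (wmax w)) with hc | hc | hc
  · have := lt_of_lt_idxOf_wmax w h q hc
    omega
  · exact hc
  · have := hlt _ hc
    rw [getElem_idxOf_wmax w h] at this
    omega

theorem greedy_length (k : Nat) (xs : List Int) (hk : k ≤ xs.length) :
    (greedy k xs).length = k := by
  induction k generalizing xs with
  | zero => simp [greedy]
  | succ k ih =>
    have hw : (xs.take (xs.length - k)).length = xs.length - k := by
      rw [List.length_take]; omega
    have hne : xs.take (xs.length - k) ≠ [] := by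
      intro hh; rw [hh] at hw; simp at hw; omega
    have hp := idxOf_wmax_lt _ hne
    rw [hw] at hp
    simp only [greedy, List.length_cons]
    rw [ih (xs.drop ((xs.take (xs.length - k)).idxOf (wmax (xs.take (xs.length - k))) + 1))
      (by rw [List.length_drop]; omega)]

theorem greedy_subset (k : Nat) (xs : List Int) (hk : k ≤ xs.length) :
    ∀ x ∈ greedy k xs, x ∈ xs := by
  induction k generalizing xs with
  | zero => simp [greedy]
  | succ k ih =>
    have hw : (xs.take (xs.length - k)).length = xs.length - k := by
      rw [List.length_take]; omega
    have hne : xs.take (xs.length - k) ≠ [] := by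
      intro hh; rw [hh] at hw; simp at hw; omega
    have hp := idxOf_wmax_lt _ hne
    rw [hw] at hp
    intro x hx
    simp only [greedy, List.mem_cons] at hx
    rcases hx with hx | hx
    · rw [hx, List.getD_eq_getElem xs 0 (by omega)]
      exact List.getElem_mem _
    · have hsub := ih (xs.drop ((xs.take (xs.length - k)).idxOf (wmax (xs.take (xs.length - k))) + 1))
        (by rw [List.length_drop]; omega) x hx
      exact List.mem_of_mem_drop hsub

theorem aPop_spec (d : Int) (s : List Int) (r : Int) :
    (aPop s r d).2 + s.length = r + (aPop s r d).1.length ∧ (aPop s r d).1 <:+ s := by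
  induction s generalizing r with
  | nil => simp [aPop]
  | cons t s ih =>
    rw [aPop]
    split_ifs with hc
    · obtain ⟨h1, h2⟩ := ih (r - 1)
      refine ⟨by simp only [List.length_cons]; push_cast; omega, h2.trans (List.suffix_cons t s)⟩
    · exact ⟨by simp, List.suffix_refl _⟩

theorem aPop_all_lt (d : Int) (s : List Int) (r : Int)
    (h : ∀ x ∈ s, x < d) (hr : (s.length : Int) ≤ r) : aPop s r d = ([], r - s.length) := by
  induction s generalizing r with
  | nil => simp [aPop]
  | cons t s ih =>
    rw [aPop]
    have hlen : ((t :: s).length : Int) = s.length + 1 := by simp only [List.length_cons]; push_cast; omega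
    rw [if_pos ⟨h t List.mem_cons_self, by rw [hlen] at hr; have := Int.natCast_nonneg s.length; omega⟩]
    rw [ih (r - 1) (fun x hx => h x (List.mem_cons_of_mem t hx)) (by rw [hlen] at hr; omega)]
    rw [hlen]; ring_nf

theorem aPop_append (d m : Int) (s : List Int) (r : Int)
    (h : r ≤ (s.length : Int) ∨ ¬ m < d) :
    aPop (s ++ [m]) r d = ((aPop s r d).1 ++ [m], (aPop s r d).2) := by
  induction s generalizing r with
  | nil =>
    simp only [List.nil_append, aPop]
    rw [if_neg]
    rcases h with h | h
    · simp at h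
      intro hc; omega
    · intro hc; exact h hc.1
  | cons t s ih =>
    simp only [List.cons_append, aPop]
    split_ifs with hc
    · apply ih (r - 1)
      rcases h with h | h
      · left
        simp only [List.length_cons] at h
        push_cast at h ⊢
        omega
      · right; exact h
    · rfl

theorem run_inv (ys : List Int) (s : List Int) (r : Int) :
    ((ys.foldl aPush (s, r)).1.length : Int) - (ys.foldl aPush (s, r)).2
      = (s.length : Int) - r + ys.length
    ∧ (∀ x ∈ (ys.foldl aPush (s, r)).1, x ∈ s ∨ x ∈ ys) := by
  induction ys generalizing s r with
  | nil => simp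
  | cons y ys ih =>
    rw [List.foldl_cons]
    have hstep : aPush (s, r) y = (y :: (aPop s r y).1, (aPop s r y).2) := rfl
    rw [hstep]
    obtain ⟨hlen, hmem⟩ := ih (y :: (aPop s r y).1) (aPop s r y).2
    obtain ⟨hl2, hsuf⟩ := aPop_spec y s r
    constructor
    · rw [hlen]
      simp only [List.length_cons]
      push_cast
      omega
    · intro x hx
      rcases hmem x hx with hx1 | hx1
      · rcases List.mem_cons.1 hx1 with hx2 | hx2
        · right; rw [hx2]; exact List.mem_cons_self
        · left; exact hsuf.subset hx2
      · right; exact List.mem_cons_of_mem _ hx1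

theorem run_prefix (m b : Int) (ys : List Int)
    (hlt : ∀ x ∈ ys, x < m) (hp : (ys.length : Int) ≤ b) :
    (ys ++ [m]).foldl aPush ([], b) = ([m], b - ys.length) := by
  rw [List.foldl_append]
  obtain ⟨hlen, hmem⟩ := run_inv ys [] b
  simp only [List.length_nil, Nat.cast_zero, zero_sub] at hlen
  set st := ys.foldl aPush ([], b) with hst
  have hmem' : ∀ x ∈ st.1, x < m := by
    intro x hx
    rcases hmem x hx with h | h
    · simp at h
    · exact hlt x h
  have hr : (st.1.length : Int) ≤ st.2 := by omega
  have : aPush st m = (m :: (aPop st.1 st.2 m).1, (aPop st.1 st.2 m).2) := rfl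
  rw [List.foldl_cons, List.foldl_nil, this, aPop_all_lt m st.1 st.2 hmem' hr]
  refine Prod.ext rfl ?_
  simp only
  omega

theorem run_bottom (m : Int) (zs : List Int) (s : List Int) (r : Int)
    (h : ∀ (i : Nat) (hi : i < zs.length), r ≤ (s.length : Int) + i ∨ ¬ m < zs[i]) :
    zs.foldl aPush (s ++ [m], r)
      = ((zs.foldl aPush (s, r)).1 ++ [m], (zs.foldl aPush (s, r)).2) := by
  induction zs generalizing s r with
  | nil => simp
  | cons z zs ih =>
    have h0 := h 0 (by simp)
    simp only [List.getElem_cons_zero, Nat.cast_zero, add_zero] at h0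
    have hstep : aPush (s ++ [m], r) z = ((z :: (aPop s r z).1) ++ [m], (aPop s r z).2) := by
      simp only [aPush, aPop_append z m s r h0, List.cons_append]
    have hstep2 : aPush (s, r) z = (z :: (aPop s r z).1, (aPop s r z).2) := rfl
    rw [List.foldl_cons, hstep, List.foldl_cons, hstep2]
    apply ih
    intro i hi
    obtain ⟨hl2, _⟩ := aPop_spec z s r
    rcases h (i + 1) (by simpa using Nat.succ_lt_succ hi) with hh | hh
    · left
      simp only [List.length_cons]
      push_cast
      push_cast at hh hl2
      omega
    · right; simpa using hh

theorem aTrim_eq_drop_aux (n : Nat) : ∀ (s : List Int) (r : Int), r.toNat = n → aTrim s r = s.drop r.toNat := by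
  induction n with
  | zero =>
    intro s r hn
    rw [aTrim, dif_neg (by omega : ¬ (0:Int) < r), hn]
    rfl
  | succ n ih =>
    intro s r hn
    rw [aTrim, dif_pos (by omega : (0:Int) < r)]
    rw [ih s.tail (r - 1) (by omega)]
    rw [← List.drop_one, List.drop_drop]
    congr 1
    omega

theorem aTrim_eq_drop (s : List Int) (r : Int) : aTrim s r = s.drop r.toNat :=
  aTrim_eq_drop_aux r.toNat s r rfl

theorem wmax_take_facts (xs : List Int) (nk : Nat) (h1 : 1 ≤ nk) (h2 : nk ≤ xs.length) :
    ((xs.take nk).idxOf (wmax (xs.take nk)) < nk)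
    ∧ xs.getD ((xs.take nk).idxOf (wmax (xs.take nk))) 0 = wmax (xs.take nk)
    ∧ (∀ i, i < (xs.take nk).idxOf (wmax (xs.take nk)) → xs.getD i 0 < wmax (xs.take nk))
    ∧ (∀ i, i < nk → xs.getD i 0 ≤ wmax (xs.take nk)) := by
  have hwlen : (xs.take nk).length = nk := by rw [List.length_take]; omega
  have hne : xs.take nk ≠ [] := by intro hh; rw [hh] at hwlen; simp at hwlen; omega
  have hplt := idxOf_wmax_lt _ hne
  rw [hwlen] at hplt
  refine ⟨hplt, ?_, ?_, ?_⟩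
  · rw [List.getD_eq_getElem xs 0 (by omega)]
    have h3 := getElem_idxOf_wmax _ hne
    rwa [List.getElem_take] at h3
  · intro i hi
    have hilt : i < nk := by omega
    rw [List.getD_eq_getElem xs 0 (by omega)]
    have h3 := lt_of_lt_idxOf_wmax _ hne i hi
    rwa [List.getElem_take] at h3
  · intro i hi
    rw [List.getD_eq_getElem xs 0 (by omega)]
    have h3 := wmax_is_max (xs.take nk) i (by omega)
    rwa [List.getElem_take] at h3

theorem stack_greedy (k : Nat) (xs : List Int) (hk : k ≤ xs.length) :
    (aTrim (xs.foldl aPush ([], (xs.length : Int) - k)).1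
           (xs.foldl aPush ([], (xs.length : Int) - k)).2).reverse = greedy k xs := by
  induction k generalizing xs with
  | zero =>
    have hz : ((xs.length : Int) - ((0 : Nat) : Int)) = (xs.length : Int) := by push_cast; ring
    rw [hz]
    obtain ⟨hlen, -⟩ := run_inv xs [] (xs.length : Int)
    rw [aTrim_eq_drop]
    have h2 : (xs.foldl aPush ([], (xs.length : Int))).2.toNat
        = (xs.foldl aPush ([], (xs.length : Int))).1.length := by
      simp only [List.length_nil] at hlen; push_cast at hlen; omega
    rw [h2, List.drop_length, List.reverse_nil]
    simp [greedy]
  | succ k ih =>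
    obtain ⟨f1, f2, f3, f4⟩ := wmax_take_facts xs (xs.length - k) (by omega) (by omega)
    set m := wmax (xs.take (xs.length - k)) with hmdef
    set p := (xs.take (xs.length - k)).idxOf m with hpdef
    have hpn : p < xs.length := by omega
    -- decompose xs around position p
    have hdecomp : xs = (xs.take p ++ [xs[p]'hpn]) ++ xs.drop (p + 1) := by
      rw [List.append_assoc, List.singleton_append, List.getElem_cons_drop, List.take_append_drop]
    have hxp : xs[p]'hpn = m := by
      have := f2
      rwa [List.getD_eq_getElem xs 0 hpn] at this
    -- the prefix is absorbed
    have hyslt : ∀ x ∈ xs.take p, x < m := by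
      intro x hx
      obtain ⟨i, hi, hxi⟩ := List.mem_take_iff_getElem.1 hx
      have h3 := f3 i (by omega)
      rw [List.getD_eq_getElem xs 0 (by omega)] at h3
      rw [← hxi]
      exact h3
    have htklen : (xs.take p).length = p := by rw [List.length_take]; omega
    have hb : ((xs.take p).length : Int) ≤ (xs.length : Int) - (k + 1) := by
      rw [htklen]; omega
    have hpre := run_prefix m ((xs.length : Int) - (k + 1)) (xs.take p) hyslt hb
    rw [htklen] at hpre
    -- past position p the budget blocks any pop of m
    have hbot := run_bottom m (xs.drop (p + 1)) [] ((xs.length : Int) - (k + 1) - p) ?_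
    · have hcast : ((xs.length : Int) - ((k + 1 : Nat) : Int)) = ((xs.length : Int) - (k + 1)) := by
        push_cast; ring
      rw [hcast]
      conv_lhs => rw [hdecomp]
      rw [hxp] at hdecomp ⊢
      rw [show (List.take p xs ++ [m] ++ List.drop (p + 1) xs).length = xs.length from by
        rw [← hdecomp]]
      rw [List.foldl_append, hpre]
      simp only [List.nil_append] at hbot
      rw [hbot]
      obtain ⟨hqlen, -⟩ := run_inv (xs.drop (p + 1)) [] ((xs.length : Int) - (k + 1) - p)
      have hzslen : (xs.drop (p + 1)).length = xs.length - (p + 1) := by rw [List.length_drop]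
      simp only [List.length_nil] at hqlen
      have hq2 : ((xs.drop (p + 1)).foldl aPush ([], (xs.length : Int) - (k + 1) - p)).2.toNat
          ≤ ((xs.drop (p + 1)).foldl aPush ([], (xs.length : Int) - (k + 1) - p)).1.length := by
        omega
      rw [aTrim_eq_drop, List.drop_append_of_le_length hq2, List.reverse_append,
        List.reverse_cons, List.reverse_nil, List.nil_append, List.singleton_append,
        ← aTrim_eq_drop]
      have hbud : (xs.length : Int) - (k + 1) - p = (((xs.drop (p + 1)).length : Int)) - k := by
        rw [hzslen]; omega
      rw [hbud]
      have hgreedy : greedy (k + 1) xs = m :: greedy k (xs.drop (p + 1)) := by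
        simp only [greedy]
        rw [← hmdef, ← hpdef, f2]
      rw [hgreedy, ih (xs.drop (p + 1)) (by rw [hzslen]; omega)]
    · intro i hi
      by_cases hcase : (i : Int) < (xs.length : Int) - (k + 1) - p
      · right
        intro hcon
        rw [List.getElem_drop] at hcon
        have hidx : p + 1 + i < xs.length := by rw [List.length_drop] at hi; omega
        have h4 := f4 (p + 1 + i) (by omega)
        rw [List.getD_eq_getElem xs 0 hidx] at h4
        exact absurd hcon (not_lt.2 h4)
      · left
        simp only [List.length_nil, Nat.cast_zero, zero_add]
        omega

-- ----- B side: the window scans compute greedy -----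
theorem leftmost_unique_getD (w : List Int) (q : Nat) (hq : q < w.length)
    (hlt : ∀ i, i < q → w.getD i 0 < w.getD q 0)
    (hle : ∀ i, i < w.length → w.getD i 0 ≤ w.getD q 0) : q = w.idxOf (wmax w) := by
  apply leftmost_unique w q hq
  · intro i h
    have h1 := hlt i h
    rwa [List.getD_eq_getElem w 0 (by omega), List.getD_eq_getElem w 0 hq] at h1
  · intro i h
    have h1 := hle i h
    rwa [List.getD_eq_getElem w 0 h, List.getD_eq_getElem w 0 hq] at h1

theorem inner_go (digits : List Int) (s hi : Int) (t : Nat) :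
    ∀ (j best : Int), hi + 1 - j = (t : Int) → s ≤ best → best < j → j ≤ hi + 1 →
    (∀ i : Int, s ≤ i → i < j →
      PySem.List.pyGetD digits i 0 ≤ PySem.List.pyGetD digits best 0) →
    (∀ i : Int, s ≤ i → i < best →
      PySem.List.pyGetD digits i 0 < PySem.List.pyGetD digits best 0) →
    s ≤ bBest digits j (hi + 1) best ∧ bBest digits j (hi + 1) best ≤ hi ∧
    (∀ i : Int, s ≤ i → i ≤ hi →
      PySem.List.pyGetD digits i 0 ≤ PySem.List.pyGetD digits (bBest digits j (hi + 1) best) 0) ∧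
    (∀ i : Int, s ≤ i → i < bBest digits j (hi + 1) best →
      PySem.List.pyGetD digits i 0 < PySem.List.pyGetD digits (bBest digits j (hi + 1) best) 0) := by
  induction t with
  | zero =>
    intro j best h0 h1 h2 h3 h4 h5
    have hj : j = hi + 1 := by omega
    subst hj
    rw [bBest, PySem.List.pyRange_one_eq_nil (le_refl _), List.foldl_nil]
    exact ⟨h1, by omega, fun i hi1 hi2 => h4 i hi1 (by omega), h5⟩
  | succ t ih =>
    intro j best h0 h1 h2 h3 h4 h5
    have hjlt : j < hi + 1 := by omega
    have hcons : bBest digits j (hi + 1) best = bBest digits (j + 1) (hi + 1)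
        (if PySem.List.pyGetD digits j 0 > PySem.List.pyGetD digits best 0 then j else best) := by
      rw [bBest, PySem.List.pyRange_one_cons hjlt, List.foldl_cons]
      rfl
    rw [hcons]
    by_cases hc : PySem.List.pyGetD digits j 0 > PySem.List.pyGetD digits best 0
    · rw [if_pos hc]
      apply ih (j + 1) j (by omega) (by omega) (by omega) (by omega)
      · intro i hi1 hi2
        rcases (by omega : i < j ∨ i = j) with hlt2 | heq
        · exact le_of_lt (lt_of_le_of_lt (h4 i hi1 hlt2) hc)
        · rw [heq]
      · intro i hi1 hi2
        exact lt_of_le_of_lt (h4 i hi1 (by omega)) hc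
    · rw [if_neg hc]
      apply ih (j + 1) best (by omega) h1 (by omega) (by omega)
      · intro i hi1 hi2
        rcases (by omega : i < j ∨ i = j) with hlt2 | heq
        · exact h4 i hi1 hlt2
        · rw [heq]; exact not_lt.mp hc
      · exact h5

theorem bSelect_cons (digits : List Int) (j : Int) (st : List Int × Int) (h : j < 12) :
    bSelect digits j st = bSelect digits (j + 1)
      (st.1 ++ [PySem.List.pyGetD digits
        (bBest digits (st.2 + 1) ((digits.length : Int) - (12 - j) + 1) st.2) 0],
       bBest digits (st.2 + 1) ((digits.length : Int) - (12 - j) + 1) st.2 + 1) := by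
  rw [bSelect, PySem.List.pyRange_one_cons h, List.foldl_cons]
  rfl

theorem drop_getD (digits : List Int) (s0 i : Nat) (h : s0 + i < digits.length) :
    (digits.drop s0).getD i 0 = digits.getD (s0 + i) 0 := by
  rw [List.getD_eq_getElem _ 0 (by rw [List.length_drop]; omega),
      List.getD_eq_getElem _ 0 h, List.getElem_drop]

theorem take_getD (xs : List Int) (nn i : Nat) (hi : i < nn) (h : i < xs.length) :
    (xs.take nn).getD i 0 = xs.getD i 0 := by
  rw [List.getD_eq_getElem _ 0 (by rw [List.length_take]; omega),
      List.getD_eq_getElem _ 0 h, List.getElem_take]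

theorem pyGetD_nat (digits : List Int) (i : Nat) :
    PySem.List.pyGetD digits (i : Int) 0 = digits.getD i 0 := PySem.List.pyGetD_natCast digits i 0

theorem outer_go (digits : List Int) (_hn : 12 ≤ digits.length) (t : Nat) :
    ∀ (j : Int) (chosen : List Int) (start : Int), (12 - j).toNat = t → 0 ≤ j → j ≤ 12 →
    0 ≤ start → start ≤ (digits.length : Int) - (12 - j) →
    (bSelect digits j (chosen, start)).1
      = chosen ++ greedy (12 - j).toNat (digits.drop start.toNat) := by
  induction t with
  | zero =>
    intro j chosen start h0 h1 h2 h3 h4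
    have hj : j = 12 := by omega
    subst hj
    rw [bSelect, PySem.List.pyRange_one_eq_nil (le_refl _), List.foldl_nil, h0]
    simp [greedy]
  | succ t ih =>
    intro j chosen start h0 h1 h2 h3 h4
    have hjlt : j < 12 := by omega
    obtain ⟨s0, rfl⟩ := Int.eq_ofNat_of_zero_le h3
    rw [bSelect_cons digits j (chosen, (s0 : Int)) hjlt]
    have hhilt : (digits.length : Int) - (12 - j) < digits.length := by omega
    obtain ⟨hb1, hb2, hb3, hb4⟩ := inner_go digits (s0 : Int) ((digits.length : Int) - (12 - j))
      ((digits.length : Int) - (12 - j) - s0).toNat ((s0 : Int) + 1) (s0 : Int)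
      (by omega) (le_refl _) (by omega) (by omega)
      (by intro i hi1 hi2
          have : i = (s0 : Int) := by omega
          rw [this])
      (by intro i hi1 hi2; omega)
    set hi : Int := (digits.length : Int) - (12 - j) with hhidef
    set best := bBest digits ((s0 : Int) + 1) (hi + 1) (s0 : Int) with hbestdef
    obtain ⟨b0, hb0⟩ := Int.eq_ofNat_of_zero_le (le_trans (Int.natCast_nonneg s0) hb1)
    rw [hb0] at hb1 hb2 hb3 hb4 ⊢
    -- the window of greedy on the suffix
    have hys : (digits.drop s0).length = digits.length - s0 := by rw [List.length_drop]
    have hs0n : s0 ≤ digits.length := by omega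
    have hs0hi : (s0 : Int) ≤ hi := h4
    have hwl : ((digits.drop s0).take ((digits.drop s0).length - t)).length
        = (digits.drop s0).length - t := by
      rw [List.length_take]; omega
    have htle : t + 1 ≤ (digits.drop s0).length := by omega
    have hwlen2 : (digits.drop s0).length - t = (hi + 1 - s0).toNat := by omega
    -- b0 - s0 is the leftmost maximum index of the window
    have hq : b0 - s0 = ((digits.drop s0).take ((digits.drop s0).length - t)).idxOf
        (wmax ((digits.drop s0).take ((digits.drop s0).length - t))) := by
      apply leftmost_unique_getD
      · rw [hwl]; omega
      · intro i hilt
        have hi2 : i < (digits.drop s0).length - t := by omega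
        rw [take_getD _ _ _ hi2 (by omega), take_getD _ _ _ (by omega) (by omega),
            drop_getD _ _ _ (by omega), drop_getD _ _ _ (by omega)]
        have := hb4 ((s0 : Int) + i) (by omega) (by omega)
        rw [show (s0 : Int) + i = ((s0 + i : Nat) : Int) by push_cast; ring,
            pyGetD_nat, pyGetD_nat] at this
        rwa [show s0 + (b0 - s0) = b0 by omega]
      · intro i hilt
        rw [hwl] at hilt
        rw [take_getD _ _ _ hilt (by omega), take_getD _ _ _ (by omega) (by omega),
            drop_getD _ _ _ (by omega), drop_getD _ _ _ (by omega)]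
        have := hb3 ((s0 : Int) + i) (by omega) (by omega)
        rw [show (s0 : Int) + i = ((s0 + i : Nat) : Int) by push_cast; ring,
            pyGetD_nat, pyGetD_nat] at this
        rwa [show s0 + (b0 - s0) = b0 by omega]
    -- apply the induction hypothesis at j + 1
    rw [ih (j + 1) (chosen ++ [PySem.List.pyGetD digits ((b0 : Nat) : Int) 0]) ((b0 : Int) + 1)
      (by omega) (by omega) (by omega) (by omega) (by omega)]
    rw [List.append_assoc]
    congr 1
    rw [Int.toNat_natCast]
    -- unfold one step of greedy
    have ht1 : (12 - j).toNat = t + 1 := h0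
    rw [ht1]
    simp only [greedy]
    rw [show ((b0 : Int) + 1).toNat = b0 + 1 by omega]
    rw [← hq]
    have hgd : (digits.drop s0).getD (b0 - s0) 0 = digits.getD b0 0 := by
      rw [drop_getD _ _ _ (by omega), show s0 + (b0 - s0) = b0 by omega]
    rw [hgd, List.singleton_append]
    congr 1
    · rw [show ((b0 : Nat) : Int) = ((b0 : Nat) : Int) from rfl, pyGetD_nat]
    · rw [List.drop_drop,
          show s0 + (b0 - s0 + 1) = b0 + 1 from by omega,
          show (12 - (j + 1)).toNat = t from by omega]

-- ----- digits are 0..9; joining their str()s is nonempty -----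
theorem pvIntChar_bounds (c : Char) (h : PySem.Chars.isdigit c = true) :
    0 ≤ pvIntChar c ∧ pvIntChar c < 10 := by
  simp only [PySem.Chars.isdigit, Bool.and_eq_true, decide_eq_true_eq, Char.le_def,
    UInt32.le_iff_toNat_le] at h
  obtain ⟨h1, h2⟩ := h
  have h1' : 48 ≤ c.val.toNat := h1
  have h2' : c.val.toNat ≤ 57 := h2
  have hc : Char.ofNat c.val.toNat = c := Char.ofNat_toNat c
  unfold pvIntChar
  interval_cases hv : c.val.toNat <;> rw [← hc] <;> decide

theorem digit_toChars (d : Int) (h0 : 0 ≤ d) (h1 : d < 10) :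
    PySem.Int.toChars d = [Char.ofNat (48 + d.toNat)] := by
  interval_cases d <;> rfl

theorem join_digits (l : List Int) (h : ∀ d ∈ l, 0 ≤ d ∧ d < 10) :
    PySem.Chars.join [] (l.map PySem.Int.toChars)
      = l.map (fun d => Char.ofNat (48 + d.toNat)) := by
  have hmap : l.map PySem.Int.toChars
      = (l.map (fun d => Char.ofNat (48 + d.toNat))).map (fun c => [c]) := by
    rw [List.map_map]
    refine List.map_congr_left (fun d hd => ?_)
    rw [digit_toChars d (h d hd).1 (h d hd).2]
    rfl
  rw [hmap, PySem.Chars.join_nil_singletons]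

-- ----- per line and top level -----
theorem bLine_nil (line : List Char) (h : line = []) : bLine line = 0 := by
  subst h; rfl

theorem line_eq (line : List Char) (h : ∀ c ∈ line, PySem.Chars.isdigit c = true) :
    aLine line = bLine line := by
  have hdig : ∀ d ∈ line.map pvIntChar, 0 ≤ d ∧ d < 10 := by
    intro d hd
    obtain ⟨c, hc, rfl⟩ := List.mem_map.1 hd
    exact pvIntChar_bounds c (h c hc)
  by_cases hn : (line.map pvIntChar).length < 12
  · rw [aLine, bLine]
    simp only [if_pos hn]
  · rw [aLine, bLine]
    simp only [if_neg hn]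
    have hlen : 12 ≤ (line.map pvIntChar).length := by omega
    have hstack := stack_greedy 12 (line.map pvIntChar) hlen
    simp only [Nat.cast_ofNat] at hstack
    have hsel := outer_go (line.map pvIntChar) hlen 12 0 [] 0 (by decide) (by decide)
      (by decide) (by decide) (by omega)
    have e1 : ((12 : Int) - 0).toNat = 12 := by decide
    have e2 : ((0 : Int)).toNat = 0 := rfl
    rw [e1, e2, List.drop_zero, List.nil_append] at hsel
    have hkeptlen : (greedy 12 (line.map pvIntChar)).length = 12 := greedy_length 12 _ hlen
    have hslice : PySem.List.slice (greedy 12 (line.map pvIntChar)) none (some 12)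
        = greedy 12 (line.map pvIntChar) := by
      have e3 : ((12 : Int)).toNat = 12 := rfl
      rw [PySem.List.slice_to _ (by decide : (0 : Int) ≤ (12 : Int)), e3]
      exact List.take_of_length_le (by omega)
    have hcs := join_digits (greedy 12 (line.map pvIntChar))
      (fun d hd => hdig d (greedy_subset 12 _ hlen d hd))
    have hne : PySem.Chars.join [] ((greedy 12 (line.map pvIntChar)).map PySem.Int.toChars)
        ≠ [] := by
      rw [hcs]
      intro hcon
      have := congrArg List.length hcon
      simp only [List.length_map, hkeptlen, List.length_nil] at this
      omega
    rw [hstack, hsel, hslice, if_pos hne]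

-- ===== VERDICT (by name: the statement is the Claim_ definition above) =====
theorem solve_batteries2_spec : Claim_equal_solve_batteries2 := by
  intro input_str _ hpre
  unfold Pre_solve_batteries2 at hpre
  simp only [List.all_eq_true] at hpre
  unfold Spec_solve_batteries2
  rw [solve_batteries2, solve_batteries2_alt]
  rw [PySem.List.foldl_congr_mem _ _ (fun acc line => acc + bLine line) 0 ?_]
  · rw [PySem.List.foldl_add _ bLine 0, zero_add]
  · intro acc line hline
    by_cases hnil : line = []
    · rw [if_pos hnil]
      show acc = acc + bLine line
      rw [bLine_nil line hnil]
      exact (add_zero acc).symm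
    · rw [if_neg hnil]
      show acc + aLine line = acc + bLine line
      rw [line_eq line (hpre line hline)]
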